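-- pv_equiv track=rewrite | github.com/maciekrybinski/peqqs | evaluation/evaluation.py | compute_scores_exp3
-- ===== SOURCE A (Python) =====
-- from typing import List, Tuple, Dict, Any
--
-- def compute_scores_exp3(predicted_list: List[str], ground_list: List[str], abstract: str) -> Tuple[int, int, int, int]:
--     matched_indices = set()
--     true_positives = 0
--     hallucination = 0
--
--     for pred in predicted_list:
--         for i, gold in enumerate(ground_list):
--             if i not in matched_indices and pred == gold:
--                 true_positives += 1
--                 matched_indices.add(i)
--                 break
--         if pred not in abstract and pred not in ground_list:
--             hallucination += 1
--
--     false_positives = len(predicted_list) - true_positives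
--     false_negatives = len(ground_list) - true_positives
--     return true_positives, false_positives, false_negatives, hallucination
-- ===== SOURCE B (Python) =====
-- def compute_scores_exp3(predicted_list, ground_list, abstract):
--     remaining = {}
--     for g in ground_list:
--         remaining[g] = remaining.get(g, 0) + 1
--     true_positives = 0
--     for pred in predicted_list:
--         if remaining.get(pred, 0) > 0:
--             true_positives += 1
--             remaining[pred] -= 1
--     hallucination = sum(1 for pred in predicted_list
--                         if pred not in abstract and pred not in ground_list)
--     false_positives = len(predicted_list) - true_positives
--     false_negatives = len(ground_list) - true_positives
--     return true_positives, false_positives, false_negatives, hallucination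
-- ===== Notes on version B (the rewrite author's own statement) =====
-- stated objective: simpler
-- what changed: Replaced the nested scan over ground_list with a matched-indices set by a multiplicity counter of ground_list that is decremented in a single pass over predicted_list (greedy first-unmatched matching equals multiset intersection), with hallucination counted in a separate comprehension.
import Mathlib
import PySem

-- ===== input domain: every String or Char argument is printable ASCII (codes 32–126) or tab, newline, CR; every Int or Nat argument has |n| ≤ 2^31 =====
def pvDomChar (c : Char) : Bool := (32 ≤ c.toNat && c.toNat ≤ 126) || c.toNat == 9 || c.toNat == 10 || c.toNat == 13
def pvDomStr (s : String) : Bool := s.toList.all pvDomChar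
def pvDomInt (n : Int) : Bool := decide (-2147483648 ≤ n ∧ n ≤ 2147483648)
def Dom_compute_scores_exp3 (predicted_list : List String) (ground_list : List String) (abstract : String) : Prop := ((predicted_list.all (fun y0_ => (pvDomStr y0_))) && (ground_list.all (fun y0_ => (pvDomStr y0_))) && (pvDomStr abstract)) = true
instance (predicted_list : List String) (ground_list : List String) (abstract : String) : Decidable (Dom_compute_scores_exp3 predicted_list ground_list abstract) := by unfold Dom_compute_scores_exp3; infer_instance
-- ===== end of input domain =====

-- B replaces A's nested scan with a matched-index set by a multiplicity counter of
-- ground_list decremented in one pass (objective: simpler; equal return value).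

-- ===== PORT A =====
-- the inner 'for i, gold in enumerate(ground_list): … break' loop
def pvFindGold (pred : String) (M : PySem.Set Int) : List (Int × String) → Option Int
  | [] => none
  | (i, gold) :: rest =>
      if !(PySem.Set.contains M i) && (gold == pred) then some i
      else pvFindGold pred M rest

-- one iteration of A's outer loop; state = (matched_indices, true_positives, hallucination)
def pvStepA (ground_list : List String) (abstract : String)
    (st : PySem.Set Int × Int × Int) (pred : String) : PySem.Set Int × Int × Int :=
  let res := pvFindGold pred st.1 (PySem.List.enumerate ground_list 0)
  let M := match res with
    | some i => PySem.Set.add st.1 i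
    | none => st.1
  let tp := match res with
    | some _ => st.2.1 + 1
    | none => st.2.1
  let hall := if !(PySem.Str.isIn pred abstract) && !(ground_list.contains pred)
    then st.2.2 + 1 else st.2.2
  (M, tp, hall)

def compute_scores_exp3 (predicted_list : List String) (ground_list : List String) (abstract : String) : Int × Int × Int × Int :=
  let st := predicted_list.foldl (pvStepA ground_list abstract) (PySem.Set.empty, 0, 0)
  let true_positives := st.2.1
  let hallucination := st.2.2
  let false_positives := (predicted_list.length : Int) - true_positives
  let false_negatives := (ground_list.length : Int) - true_positives
  (true_positives, false_positives, false_negatives, hallucination)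

-- ===== PORT B =====
-- one iteration of B's matching loop; state = (true_positives, remaining)
def pvStepB (st : Int × PySem.Dict String Int) (pred : String) : Int × PySem.Dict String Int :=
  if st.2.getD pred 0 > 0 then (st.1 + 1, st.2.insert pred (st.2.getD pred 0 - 1))
  else st

def compute_scores_exp3_alt (predicted_list : List String) (ground_list : List String) (abstract : String) : Int × Int × Int × Int :=
  let remaining : PySem.Dict String Int :=
    ground_list.foldl (fun d g => d.insert g (d.getD g 0 + 1)) PySem.Dict.empty
  let true_positives := (predicted_list.foldl pvStepB (0, remaining)).1
  let hallucination := predicted_list.foldl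
    (fun h pred => if !(PySem.Str.isIn pred abstract) && !(ground_list.contains pred)
                   then h + 1 else h) (0 : Int)
  let false_positives := (predicted_list.length : Int) - true_positives
  let false_negatives := (ground_list.length : Int) - true_positives
  (true_positives, false_positives, false_negatives, hallucination)

-- ===== PRECONDITION & SPEC =====
def Spec_compute_scores_exp3 (predicted_list : List String) (ground_list : List String) (abstract : String) (out : Int × Int × Int × Int) : Prop := out = compute_scores_exp3_alt predicted_list ground_list abstract
instance (predicted_list : List String) (ground_list : List String) (abstract : String) (out : Int × Int × Int × Int) : Decidable (Spec_compute_scores_exp3 predicted_list ground_list abstract out) := by unfold Spec_compute_scores_exp3; infer_instance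

-- ===== CLAIM (what is proved, stated in full; the proofs are below) =====
def Claim_equal_compute_scores_exp3 : Prop := ∀ (predicted_list : List String) (ground_list : List String) (abstract : String), Dom_compute_scores_exp3 predicted_list ground_list abstract → Spec_compute_scores_exp3 predicted_list ground_list abstract (compute_scores_exp3 predicted_list ground_list abstract)

-- ===== LEMMAS AND PROOFS =====

-- number of matched indices whose gold value is v
def pvMC (gl : List String) (M : List Int) (v : String) : Nat :=
  M.countP (fun i => decide (gl[i.toNat]? = some v))

-- the invariant tying A's matched set to B's remaining counter
def pvInv (gl : List String) (M : List Int) (rem : PySem.Dict String Int) : Prop :=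
  M.Nodup ∧ (∀ i ∈ M, 0 ≤ i) ∧
  ∀ v, rem.getD v 0 = (gl.count v : Int) - (pvMC gl M v : Int)

-- positions (as Ints, starting at s) of occurrences of v in gl
def pvPos (gl : List String) (s : Int) (v : String) : List Int :=
  match gl with
  | [] => []
  | g :: rest => if g = v then s :: pvPos rest (s + 1) v else pvPos rest (s + 1) v

lemma length_pvPos (gl : List String) (s : Int) (v : String) :
    (pvPos gl s v).length = gl.count v := by
  induction gl generalizing s with
  | nil => simp [pvPos]
  | cons g rest ih =>
    by_cases h : g = v <;> simp [pvPos, h, ih]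

lemma mem_pvPos {gl : List String} {s i : Int} {v : String} :
    i ∈ pvPos gl s v ↔ ∃ k : Nat, i = s + k ∧ gl[k]? = some v := by
  induction gl generalizing s with
  | nil => simp [pvPos]
  | cons g rest ih =>
    by_cases h : g = v
    · simp only [pvPos, if_pos h, List.mem_cons, ih]
      constructor
      · rintro (rfl | ⟨k, rfl, hk⟩)
        · exact ⟨0, by simp, by simp [h]⟩
        · exact ⟨k + 1, by push_cast; ring, by simpa using hk⟩
      · rintro ⟨k, rfl, hk⟩
        cases k with
        | zero => left; simp
        | succ k =>
          right; exact ⟨k, by push_cast; ring, by simpa using hk⟩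
    · simp only [pvPos, if_neg h, ih]
      constructor
      · rintro ⟨k, rfl, hk⟩
        exact ⟨k + 1, by push_cast; ring, by simpa using hk⟩
      · rintro ⟨k, rfl, hk⟩
        cases k with
        | zero => simp at hk; exact absurd hk h
        | succ k =>
          exact ⟨k, by push_cast; ring, by simpa using hk⟩

lemma le_of_mem_pvPos {gl : List String} {s i : Int} {v : String}
    (h : i ∈ pvPos gl s v) : s ≤ i := by
  obtain ⟨k, rfl, -⟩ := mem_pvPos.1 h
  omega

lemma nodup_pvPos (gl : List String) (s : Int) (v : String) :
    (pvPos gl s v).Nodup := by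
  induction gl generalizing s with
  | nil => simp [pvPos]
  | cons g rest ih =>
    by_cases h : g = v
    · simp only [pvPos, if_pos h]
      refine List.nodup_cons.2 ⟨fun hm => ?_, ih (s + 1)⟩
      have := le_of_mem_pvPos hm; omega
    · simp only [pvPos, if_neg h]
      exact ih (s + 1)

-- pvFindGold on enumerate: success characterisation
lemma pvFindGold_some {pred : String} {M : PySem.Set Int} {gl : List String} {s i : Int}
    (h : pvFindGold pred M (PySem.List.enumerate gl s) = some i) :
    ¬ i ∈ M ∧ ∃ k : Nat, i = s + k ∧ gl[k]? = some pred := by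
  induction gl generalizing s with
  | nil => simp [PySem.List.enumerate, pvFindGold] at h
  | cons g rest ih =>
    rw [PySem.List.enumerate_cons] at h
    by_cases hc : !(PySem.Set.contains M s) && (g == pred)
    · rw [pvFindGold, if_pos hc] at h
      cases h
      simp only [Bool.and_eq_true, Bool.not_eq_true', beq_iff_eq] at hc
      refine ⟨fun hm => ?_, 0, by simp, by simp [hc.2]⟩
      rw [(PySem.Set.contains_iff M i).2 hm] at hc
      exact absurd hc.1 (by simp)
    · rw [pvFindGold, if_neg hc] at h
      obtain ⟨hm, k, rfl, hk⟩ := ih h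
      exact ⟨hm, k + 1, by push_cast; ring, by simpa using hk⟩

-- pvFindGold on enumerate: failure characterisation
lemma pvFindGold_none {pred : String} {M : PySem.Set Int} {gl : List String} {s : Int}
    (h : pvFindGold pred M (PySem.List.enumerate gl s) = none) :
    ∀ k : Nat, gl[k]? = some pred → (s + (k : Int)) ∈ M := by
  induction gl generalizing s with
  | nil => intro k hk; simp at hk
  | cons g rest ih =>
    rw [PySem.List.enumerate_cons] at h
    by_cases hc : !(PySem.Set.contains M s) && (g == pred)
    · rw [pvFindGold, if_pos hc] at h; cases h
    · rw [pvFindGold, if_neg hc] at h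
      intro k hk
      cases k with
      | zero =>
        simp only [List.getElem?_cons_zero, Option.some.injEq] at hk
        subst hk
        simp only [Bool.and_eq_true, Bool.not_eq_true', beq_self_eq_true, and_true,
          Bool.not_eq_false] at hc
        have := (PySem.Set.contains_iff M s).1 hc
        simpa using this
      | succ k =>
        have := ih h k (by simpa using hk)
        have heq : s + ((k + 1 : Nat) : Int) = s + 1 + (k : Int) := by push_cast; ring
        rw [heq]
        exact this

-- countP over a nonneg matched set counts exactly its members that are pred-positions
lemma mem_filter_pos {gl : List String} {M : List Int} {v : String}
    (hpos : ∀ i ∈ M, 0 ≤ i) {j : Int}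
    (hj : j ∈ M.filter (fun i => decide (gl[i.toNat]? = some v))) :
    j ∈ pvPos gl 0 v := by
  rw [List.mem_filter] at hj
  obtain ⟨hjM, hjp⟩ := hj
  have h0 : 0 ≤ j := hpos j hjM
  refine mem_pvPos.2 ⟨j.toNat, by omega, by simpa using hjp⟩

-- if the scan failed, every position of pred is matched: count ≤ pvMC
lemma count_le_mc_of_none {gl : List String} {M : PySem.Set Int} {pred : String}
    (h : pvFindGold pred M (PySem.List.enumerate gl 0) = none) :
    gl.count pred ≤ pvMC gl M pred := by
  have hsub : pvPos gl 0 pred ⊆ M.filter (fun i => decide (gl[i.toNat]? = some pred)) := by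
    intro j hj
    obtain ⟨k, rfl, hk⟩ := mem_pvPos.1 hj
    have hmem := pvFindGold_none h k hk
    rw [List.mem_filter]
    exact ⟨hmem, by simp [hk]⟩
  have hlen := ((nodup_pvPos gl 0 pred).subperm hsub).length_le
  rw [length_pvPos] at hlen
  calc gl.count pred ≤ (M.filter _).length := hlen
    _ = pvMC gl M pred := List.countP_eq_length_filter.symm

-- if the scan found an unmatched position, pvMC < count
lemma mc_lt_count_of_some {gl : List String} {M : PySem.Set Int} {pred : String} {i : Int}
    (hnd : M.Nodup) (hpos : ∀ j ∈ M, 0 ≤ j)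
    (h : pvFindGold pred M (PySem.List.enumerate gl 0) = some i) :
    pvMC gl M pred < gl.count pred := by
  obtain ⟨hiM, k, rfl, hk⟩ := pvFindGold_some h
  have hipos : ((0 : Int) + k) ∈ pvPos gl 0 pred := mem_pvPos.2 ⟨k, rfl, hk⟩
  have hnd' : (((0 : Int) + k) :: M.filter (fun j => decide (gl[j.toNat]? = some pred))).Nodup := by
    refine List.nodup_cons.2 ⟨fun hm => hiM (List.mem_filter.1 hm).1, hnd.filter _⟩
  have hsub : (((0 : Int) + k) :: M.filter (fun j => decide (gl[j.toNat]? = some pred)))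
      ⊆ pvPos gl 0 pred := by
    intro j hj
    rcases List.mem_cons.1 hj with rfl | hj
    · exact hipos
    · exact mem_filter_pos hpos hj
  have hlen := (hnd'.subperm hsub).length_le
  rw [length_pvPos] at hlen
  simp only [List.length_cons] at hlen
  have : (M.filter (fun j => decide (gl[j.toNat]? = some pred))).length = pvMC gl M pred :=
    List.countP_eq_length_filter.symm
  omega

lemma pvMC_append (gl : List String) (M : List Int) (i : Int) (v : String) :
    pvMC gl (M ++ [i]) v =
      pvMC gl M v + (if gl[i.toNat]? = some v then 1 else 0) := by
  simp [pvMC, List.countP_append]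

-- the two matching loops agree on true_positives, given the invariant
lemma loop_tp_eq (gl : List String) (ab : String) :
    ∀ (pl : List String) (M : PySem.Set Int) (rem : PySem.Dict String Int)
      (tp hall : Int), pvInv gl M rem →
      (pl.foldl (pvStepA gl ab) (M, tp, hall)).2.1 = (pl.foldl pvStepB (tp, rem)).1 := by
  intro pl
  induction pl with
  | nil => intro M rem tp hall _; rfl
  | cons pred rest ih =>
    intro M rem tp hall hInv
    obtain ⟨hnd, hpos, hcnt⟩ := hInv
    simp only [List.foldl_cons]
    rcases hf : pvFindGold pred M (PySem.List.enumerate gl 0) with _ | i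
    · -- no match found: B's counter is exhausted for pred
      have hle := count_le_mc_of_none hf
      have hB : pvStepB (tp, rem) pred = (tp, rem) := by
        unfold pvStepB
        rw [if_neg]
        simp only [hcnt pred]
        omega
      have hA : pvStepA gl ab (M, tp, hall) pred =
          (M, tp, if !(PySem.Str.isIn pred ab) && !(gl.contains pred) then hall + 1 else hall) := by
        simp only [pvStepA, hf]
      rw [hA, hB]
      exact ih M rem tp _ ⟨hnd, hpos, hcnt⟩
    · -- match found: both sides count one true positive
      obtain ⟨hiM, k, hik, hk⟩ := pvFindGold_some hf
      have hik0 : i = (0 : Int) + k := hik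
      have hlt := mc_lt_count_of_some hnd hpos hf
      have hposgt : rem.getD pred 0 > 0 := by rw [hcnt pred]; omega
      have hB : pvStepB (tp, rem) pred =
          (tp + 1, rem.insert pred (rem.getD pred 0 - 1)) := by
        unfold pvStepB; rw [if_pos hposgt]
      have hadd : PySem.Set.add M i = M ++ [i] := by
        unfold PySem.Set.add
        rw [if_neg]
        intro hc
        exact hiM ((PySem.Set.contains_iff M i).1 hc)
      have hA : pvStepA gl ab (M, tp, hall) pred =
          (M ++ [i], tp + 1,
           if !(PySem.Str.isIn pred ab) && !(gl.contains pred) then hall + 1 else hall) := by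
        simp only [pvStepA, hf, hadd]
      rw [hA, hB]
      apply ih
      have hitn : gl[i.toNat]? = some pred := by
        have : i.toNat = k := by omega
        rw [this]; exact hk
      refine ⟨?_, ?_, ?_⟩
      · exact hnd.append (List.nodup_singleton i) (List.disjoint_singleton.2 hiM)
      · intro j hj
        rcases List.mem_append.1 hj with hj | hj
        · exact hpos j hj
        · simp only [List.mem_singleton] at hj; subst hj; omega
      · intro v
        by_cases hv : v = pred
        · subst hv
          rw [PySem.Dict.getD_insert, if_pos rfl, hcnt v, pvMC_append, if_pos hitn]
          push_cast; ring
        · rw [PySem.Dict.getD_insert, if_neg hv, hcnt v,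
            pvMC_append, if_neg (by rw [hitn]; exact fun h => hv (Option.some.inj h).symm)]
          push_cast; ring

-- A's hallucination component equals B's separate pass
lemma loop_hall_eq (gl : List String) (ab : String) :
    ∀ (pl : List String) (M : PySem.Set Int) (tp hall : Int),
      (pl.foldl (pvStepA gl ab) (M, tp, hall)).2.2 =
      pl.foldl (fun h pred => if !(PySem.Str.isIn pred ab) && !(gl.contains pred)
                              then h + 1 else h) hall := by
  intro pl
  induction pl with
  | nil => intro M tp hall; rfl
  | cons pred rest ih =>
    intro M tp hall
    simp only [List.foldl_cons]
    rcases hf : pvFindGold pred M (PySem.List.enumerate gl 0) with _ | i <;>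
      · unfold pvStepA; rw [hf]; exact ih _ _ _

-- the initial counter satisfies the invariant
lemma init_inv (gl : List String) :
    pvInv gl PySem.Set.empty
      (gl.foldl (fun d g => d.insert g (d.getD g 0 + 1)) PySem.Dict.empty) := by
  refine ⟨List.nodup_nil, by simp [PySem.Set.empty], fun v => ?_⟩
  rw [PySem.Dict.getD_foldl_insert_add_one]
  simp [pvMC, PySem.Set.empty]

-- ===== VERDICT (by name: the statement is the Claim_ definition above) =====
theorem compute_scores_exp3_spec : Claim_equal_compute_scores_exp3 := by
  intro pl gl ab _
  unfold Spec_compute_scores_exp3 compute_scores_exp3 compute_scores_exp3_alt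
  have htp := loop_tp_eq gl ab pl PySem.Set.empty _ 0 0 (init_inv gl)
  have hhall := loop_hall_eq gl ab pl PySem.Set.empty 0 0
  simp only [htp, hhall]
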